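-- pv_equiv track=rewrite | github.com/FoxedGuy/pas | lab5/zad3.py | generate_permutation_of_ports
-- ===== SOURCE A (Python) =====
-- def generate_permutation_of_ports(ports):
--     permutations = []
--     for i in range(0, len(ports)):
--         for j in range(0, len(ports)):
--             for k in range(0, len(ports)):
--                 if i != j and j != k and i != k:
--                     permutations.append([ports[i], ports[j], ports[k]])
--     return permutations
-- ===== SOURCE B (Python) =====
-- def generate_permutation_of_ports(ports):
--     def perms(r, xs):
--         if r == 0:
--             return [[]]
--         return [[xs[i]] + rest
--                 for i in range(len(xs))
--                 for rest in perms(r - 1, xs[:i] + xs[i + 1:])]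
--     return perms(3, ports)
-- ===== Notes on version B (the rewrite author's own statement) =====
-- stated objective: alternative
-- what changed: Replaces the n^3 index-cube scan with a distinctness filter by the standard pick-and-remove recursion (itertools.permutations-style): choose each element in turn and recurse on the list with that position removed, so no triple with coinciding positions is ever generated.
import Mathlib
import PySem

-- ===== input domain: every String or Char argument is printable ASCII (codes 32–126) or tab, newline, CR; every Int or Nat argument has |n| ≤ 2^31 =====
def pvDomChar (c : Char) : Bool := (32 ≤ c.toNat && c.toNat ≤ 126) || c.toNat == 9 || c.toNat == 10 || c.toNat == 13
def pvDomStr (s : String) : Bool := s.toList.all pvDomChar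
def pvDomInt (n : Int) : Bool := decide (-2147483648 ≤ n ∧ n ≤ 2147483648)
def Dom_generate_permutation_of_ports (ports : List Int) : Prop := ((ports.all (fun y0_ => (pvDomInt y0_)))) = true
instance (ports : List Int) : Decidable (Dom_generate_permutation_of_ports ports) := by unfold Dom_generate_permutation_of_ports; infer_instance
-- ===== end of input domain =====

-- B replaces A's n^3 index-cube scan with its distinctness filter by the standard
-- pick-and-remove recursion generating only position-distinct triples (objective: alternative algorithm).

-- ===== PORT A =====
def generate_permutation_of_ports (ports : List Int) : List (List Int) :=
  (PySem.List.pyRange 0 (ports.length : Int) 1).foldl (fun acc i =>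
    (PySem.List.pyRange 0 (ports.length : Int) 1).foldl (fun acc j =>
      (PySem.List.pyRange 0 (ports.length : Int) 1).foldl (fun acc k =>
        if i ≠ j ∧ j ≠ k ∧ i ≠ k then
          acc ++ [[PySem.List.pyGetD ports i 0, PySem.List.pyGetD ports j 0,
                   PySem.List.pyGetD ports k 0]]
        else acc) acc) acc) []

-- ===== PORT B =====
-- `xs[:i] + xs[i+1:]` for 0 ≤ i < len(xs) is exactly `xs.eraseIdx i`
def pvPerms : Nat → List Int → List (List Int)
  | 0, _ => [[]]
  | r + 1, xs =>
      (List.range xs.length).flatMap (fun i =>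
        (pvPerms r (xs.eraseIdx i)).map (fun rest => xs.getD i 0 :: rest))

def generate_permutation_of_ports_alt (ports : List Int) : List (List Int) :=
  pvPerms 3 ports

-- ===== PRECONDITION & SPEC =====
def Spec_generate_permutation_of_ports (ports : List Int) (out : List (List Int)) : Prop := out = generate_permutation_of_ports_alt ports
instance (ports : List Int) (out : List (List Int)) : Decidable (Spec_generate_permutation_of_ports ports out) := by unfold Spec_generate_permutation_of_ports; infer_instance

-- ===== CLAIM (what is proved, stated in full; the proofs are below) =====
def Claim_equal_generate_permutation_of_ports : Prop := ∀ (ports : List Int), Dom_generate_permutation_of_ports ports → Spec_generate_permutation_of_ports ports (generate_permutation_of_ports ports)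

-- ===== LEMMAS AND PROOFS =====

-- the order-preserving embedding of positions of `xs.eraseIdx i` into positions of `xs`
def pvEmb (i j : Nat) : Nat := if j < i then j else j + 1

theorem pvEmb_ne (i j : Nat) : pvEmb i j ≠ i := by
  unfold pvEmb; split <;> omega

theorem pvEmb_inj (i a b : Nat) : pvEmb i a = pvEmb i b ↔ a = b := by
  unfold pvEmb; split <;> split <;> omega

-- the indices ≠ i of `range n`, in order, are the embedded indices of `range (n-1)`
theorem pv_range_filter_ne (n i : Nat) (h : i < n) :
    (List.range n).filter (fun j => decide (¬ j = i)) = (List.range (n - 1)).map (pvEmb i) := by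
  induction n with
  | zero => omega
  | succ n ih =>
    rcases Nat.lt_or_ge i n with hi | hi
    · rw [List.range_succ, List.filter_append, ih hi]
      have h1 : n - 1 + 1 = n := by omega
      rw [show (n + 1 - 1) = (n - 1) + 1 by omega, List.range_succ, List.map_append]
      simp [pvEmb, show n ≠ i by omega, show ¬ (n - 1 < i) by omega, h1]
    · have hin : i = n := by omega
      rw [hin, List.range_succ, List.filter_append]
      have h1 : ∀ j ∈ List.range n, (fun j => decide (¬ j = n)) j = true := by
        intro j hj; simp at hj ⊢; omega
      rw [List.filter_eq_self.mpr h1]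
      have h2 : ∀ j ∈ List.range n, pvEmb n j = j := by
        intro j hj; simp at hj; simp [pvEmb, hj]
      simp [List.map_congr_left h2]

theorem pvEmb_lt (i j m : Nat) (h : j < m) : pvEmb i j < m + 1 := by
  unfold pvEmb; split <;> omega

-- getD through eraseIdx
theorem pv_getD_eraseIdx (xs : List Int) (i j : Nat) (hi : i < xs.length)
    (hj : j < xs.length - 1) (d : Int) :
    (xs.eraseIdx i).getD j d = xs.getD (pvEmb i j) d := by
  have hlen : (xs.eraseIdx i).length = xs.length - 1 := by
    rw [List.length_eraseIdx]; simp [hi]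
  by_cases h : j < i
  · rw [List.getD_eq_getElem _ _ (by omega : j < (xs.eraseIdx i).length),
        List.getElem_eraseIdx_of_lt _ h]
    unfold pvEmb
    rw [if_pos h, List.getD_eq_getElem _ _ (by omega)]
  · rw [List.getD_eq_getElem _ _ (by omega : j < (xs.eraseIdx i).length),
        List.getElem_eraseIdx_of_ge _ (by omega)]
    unfold pvEmb
    rw [if_neg h, List.getD_eq_getElem _ _ (by omega)]

-- dropping list elements whose loop body contributes nothing
theorem pv_flatMap_eq_filter_flatMap {α β : Type} (l : List α) (p : α → Bool)
    (f : α → List β) (h : ∀ x ∈ l, p x = false → f x = []) :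
    l.flatMap f = (l.filter p).flatMap f := by
  induction l with
  | nil => rfl
  | cons x l ih =>
    have ih' := ih (fun y hy => h y (by simp [hy]))
    by_cases hp : p x = true
    · simp [List.flatMap_cons, hp, ih']
    · have hx : f x = [] := h x (by simp) (by simpa using hp)
      simp [List.flatMap_cons, hp, hx, ih']

theorem pv_flatMap_single {α β : Type} (l : List α) (f : α → β) :
    l.flatMap (fun x => [f x]) = l.map f := by
  induction l with
  | nil => rfl
  | cons x l ih => simp [ih]

-- Prop-conditioned append-if loop
theorem pv_foldl_append_if {α β : Type} (l : List α) (p : α → Prop) [DecidablePred p]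
    (f : α → β) (acc : List β) :
    l.foldl (fun acc x => if p x then acc ++ [f x] else acc) acc
      = acc ++ (l.filter (fun x => decide (p x))).map f := by
  induction l generalizing acc with
  | nil => simp
  | cons x l ih =>
    rw [List.foldl_cons, List.filter_cons]
    by_cases hx : p x <;> simp [hx, ih]

-- step 1: A in index-cube form over Nat
theorem pv_A_cube (xs : List Int) :
    generate_permutation_of_ports xs =
      (List.range xs.length).flatMap (fun i =>
        (List.range xs.length).flatMap (fun j =>
          ((List.range xs.length).filter
              (fun k => decide (¬ i = j ∧ ¬ j = k ∧ ¬ i = k))).map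
            (fun k => [xs.getD i 0, xs.getD j 0, xs.getD k 0]))) := by
  unfold generate_permutation_of_ports
  simp only [PySem.List.pyRange_zero_nat, List.foldl_map, PySem.List.pyGetD_natCast,
    ne_eq, Int.natCast_inj, pv_foldl_append_if, PySem.List.foldl_append_eq_flatMap,
    List.nil_append]

-- step 2: for each admissible first index, A's two inner loops produce B's block
theorem pv_mid (xs : List Int) (i : Nat) (hi : i < xs.length) :
    (List.range xs.length).flatMap (fun j =>
        ((List.range xs.length).filter
            (fun k => decide (¬ i = j ∧ ¬ j = k ∧ ¬ i = k))).map
          (fun k => [xs.getD i 0, xs.getD j 0, xs.getD k 0]))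
      = (pvPerms 2 (xs.eraseIdx i)).map (fun rest => xs.getD i 0 :: rest) := by
  have hlen : (xs.eraseIdx i).length = xs.length - 1 := by
    rw [List.length_eraseIdx]; simp [hi]
  -- drop the iterations j = i, whose filter is empty
  rw [pv_flatMap_eq_filter_flatMap _ (fun j => decide (¬ j = i)) _ (by
    intro j hj hjf
    have : j = i := by simpa using hjf
    subst this
    simp)]
  rw [pv_range_filter_ne _ _ hi, List.flatMap_map]
  -- unfold B's two inner levels into flatMap form
  show _ = ((List.range (xs.eraseIdx i).length).flatMap (fun j =>
      (pvPerms 1 ((xs.eraseIdx i).eraseIdx j)).map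
        (fun rest => (xs.eraseIdx i).getD j 0 :: rest))).map _
  simp only [pvPerms, List.map_flatMap, List.map_map, hlen]
  refine List.flatMap_congr ?_
  intro j hj
  have hj1 : j < xs.length - 1 := by simpa using hj
  have hlen2 : ((xs.eraseIdx i).eraseIdx j).length = xs.length - 1 - 1 := by
    rw [List.length_eraseIdx]; simp [hlen, hj1]
  have hne : ¬ i = pvEmb i j := fun h => pvEmb_ne i j h.symm
  -- rewrite the filter predicate pointwise (the i ≠ pvEmb i j conjunct is always true)
  rw [List.filter_congr (q := fun k => decide (¬ k = pvEmb i j) && decide (¬ k = i)) (by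
    intro k _
    by_cases h1 : pvEmb i j = k <;> by_cases h2 : i = k <;>
      simp [h1, h2, hne] <;> omega)]
  rw [← List.filter_filter, pv_range_filter_ne _ _ hi, List.filter_map]
  rw [List.filter_congr (l := List.range (xs.length - 1))
        (q := fun k => decide (¬ k = j)) (by
    intro k _
    simp [Function.comp, pvEmb_inj])]
  rw [pv_range_filter_ne _ _ hj1, List.map_map, List.map_map, hlen2]
  simp only [List.map_cons, List.map_nil, Function.comp]
  rw [pv_flatMap_single]
  refine List.map_congr_left ?_
  intro k hk
  have hk1 : k < xs.length - 1 - 1 := by simpa using hk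
  have hemb : pvEmb j k < xs.length - 1 := by
    have := pvEmb_lt j k (xs.length - 1 - 1) hk1
    omega
  simp only [Function.comp]
  rw [pv_getD_eraseIdx _ _ _ (by omega) (by omega),
      pv_getD_eraseIdx _ _ _ (by omega) (by omega),
      pv_getD_eraseIdx _ _ _ (by omega) hemb]

-- ===== VERDICT (by name: the statement is the Claim_ definition above) =====
theorem generate_permutation_of_ports_spec : Claim_equal_generate_permutation_of_ports := by
  intro ports _
  unfold Spec_generate_permutation_of_ports generate_permutation_of_ports_alt
  rw [pv_A_cube]
  show _ = pvPerms 3 ports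
  rw [show pvPerms 3 ports = (List.range ports.length).flatMap (fun i =>
        (pvPerms 2 (ports.eraseIdx i)).map (fun rest => ports.getD i 0 :: rest)) from rfl]
  refine List.flatMap_congr ?_
  intro i hi
  exact pv_mid ports i (by simpa using hi)
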